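-- pv_equiv track=rewrite | github.com/gilangmlr/tlx-solutions | Training Gate/Kelas Pembelajaran Pemrograman/2. Pemrograman Kompetitif Dasar/02. Matematika Diskret Dasar/a-faktorisasi_prima.py | prime_factors_to_string
-- ===== SOURCE A (Python) =====
-- def prime_factors_to_string(factors):
--   result = []
--   unique_factors = sorted(set(factors))
--   for factor in unique_factors:
--     if factors.count(factor) > 1:
--       result.append('{}^{}'.format(factor, factors.count(factor)))
--     else:
--       result.append(str(factor))
--
--   return ' x '.join(result)
-- ===== SOURCE B (Python) =====
-- def _flush(cur, cnt, parts):
--   if cnt == 1: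
--     return parts + [str(cur)]
--   elif cnt > 1:
--     return parts + ['{}^{}'.format(cur, cnt)]
--   return parts
--
--
-- def prime_factors_to_string(factors):
--   # one pass over the fully sorted list, emitting each run as it ends
--   parts = []
--   cur = 0
--   cnt = 0
--   for v in sorted(factors):
--     if cnt > 0 and v == cur:
--       cnt += 1
--     else:
--       parts = _flush(cur, cnt, parts)
--       cur = v
--       cnt = 1
--   return ' x '.join(_flush(cur, cnt, parts))
-- ===== Notes on version B (the rewrite author's own statement) =====
-- stated objective: faster
-- what changed: B sorts the whole list once and emits each (value, run-length) group in a single linear scan, instead of A's per-unique-factor factors.count rescans over the full list.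
import Mathlib
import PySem

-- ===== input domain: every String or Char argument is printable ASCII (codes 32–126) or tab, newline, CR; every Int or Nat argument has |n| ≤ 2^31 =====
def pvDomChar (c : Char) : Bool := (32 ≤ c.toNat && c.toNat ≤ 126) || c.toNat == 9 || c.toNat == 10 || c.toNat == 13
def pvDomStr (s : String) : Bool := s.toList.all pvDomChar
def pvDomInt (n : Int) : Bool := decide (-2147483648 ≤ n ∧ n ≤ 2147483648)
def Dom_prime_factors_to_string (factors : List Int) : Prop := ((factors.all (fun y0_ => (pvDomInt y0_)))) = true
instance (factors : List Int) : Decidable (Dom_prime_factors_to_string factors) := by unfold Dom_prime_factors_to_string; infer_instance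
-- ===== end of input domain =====

-- B sorts the whole list once and emits each run in one linear scan, replacing A's per-unique-factor count rescans (faster).

-- ===== PORT A =====
def prime_factors_to_string (factors : List Int) : String :=
  let unique_factors := PySem.List.sorted (PySem.Set.ofList factors) (fun x => x) false
  let result := unique_factors.foldl (fun result factor =>
    if 1 < PySem.List.count factors factor then
      result ++ [PySem.Int.toStr factor ++ "^" ++ PySem.Int.toStr ((PySem.List.count factors factor : Nat) : Int)]
    else
      result ++ [PySem.Int.toStr factor]) []
  PySem.Str.join " x " result

-- ===== PORT B =====
-- _flush in Source B
def pvFlush (cur : Int) (cnt : Nat) (parts : List String) : List String :=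
  if cnt = 1 then parts ++ [PySem.Int.toStr cur]
  else if 1 < cnt then parts ++ [PySem.Int.toStr cur ++ "^" ++ PySem.Int.toStr (cnt : Int)]
  else parts

-- the body of B's single for-loop, state = (parts, cur, cnt)
def pvStep (st : List String × Int × Nat) (v : Int) : List String × Int × Nat :=
  if 0 < st.2.2 ∧ v = st.2.1 then (st.1, st.2.1, st.2.2 + 1)
  else (pvFlush st.2.1 st.2.2 st.1, v, 1)

def prime_factors_to_string_alt (factors : List Int) : String :=
  let st := (PySem.List.sorted factors (fun x => x) false).foldl pvStep ([], 0, 0)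
  PySem.Str.join " x " (pvFlush st.2.1 st.2.2 st.1)

-- ===== PRECONDITION & SPEC =====
def Spec_prime_factors_to_string (factors : List Int) (out : String) : Prop := out = prime_factors_to_string_alt factors
instance (factors : List Int) (out : String) : Decidable (Spec_prime_factors_to_string factors out) := by unfold Spec_prime_factors_to_string; infer_instance

-- ===== CLAIM (what is proved, stated in full; the proofs are below) =====
def Claim_equal_prime_factors_to_string : Prop := ∀ (factors : List Int), Dom_prime_factors_to_string factors → Spec_prime_factors_to_string factors (prime_factors_to_string factors)

-- ===== LEMMAS AND PROOFS =====

-- the string emitted for a factor x occurring n ≥ 1 times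
def pvFmt (x : Int) (n : Nat) : String :=
  if n = 1 then PySem.Int.toStr x
  else PySem.Int.toStr x ++ "^" ++ PySem.Int.toStr (n : Int)

theorem pvFlush_pos (cur : Int) (cnt : Nat) (parts : List String) (h : 0 < cnt) :
    pvFlush cur cnt parts = parts ++ [pvFmt cur cnt] := by
  unfold pvFlush pvFmt
  by_cases h1 : cnt = 1
  · simp [h1]
  · have h2 : 1 < cnt := by omega
    simp [h1, h2]

-- folding the tail of a run only increments the counter
theorem pvStep_replicate (k : Nat) : ∀ (parts : List String) (cur : Int) (cnt : Nat), 0 < cnt →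
    List.foldl pvStep (parts, cur, cnt) (List.replicate k cur) = (parts, cur, cnt + k) := by
  induction k with
  | zero => intro parts cur cnt _; simp
  | succ k ih =>
      intro parts cur cnt h
      rw [List.replicate_succ, List.foldl_cons]
      have hs : pvStep (parts, cur, cnt) cur = (parts, cur, cnt + 1) := by
        simp [pvStep, h]
      rw [hs, ih parts cur (cnt + 1) (by omega)]
      have : cnt + 1 + k = cnt + (k + 1) := by omega
      rw [this]

-- main loop invariant: folding the runs of a strictly increasing block list
theorem pvStep_runs (m : Int → Nat) :
    ∀ (u : List Int) (parts : List String) (cur : Int) (cnt : Nat),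
    u.Pairwise (· < ·) → (∀ x ∈ u, 0 < m x) → (∀ x ∈ u, cnt = 0 ∨ cur < x) →
    (fun st => pvFlush st.2.1 st.2.2 st.1)
        (List.foldl pvStep (parts, cur, cnt) (u.flatMap (fun x => List.replicate (m x) x)))
      = pvFlush cur cnt parts ++ u.map (fun x => pvFmt x (m x)) := by
  intro u
  induction u with
  | nil => intro parts cur cnt _ _ _; simp
  | cons x u' ih =>
      intro parts cur cnt hpw hm hlo
      have hmx : 0 < m x := hm x (List.mem_cons_self ..)
      have hrep : List.replicate (m x) x = x :: List.replicate (m x - 1) x := by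
        cases hmx' : m x with
        | zero => omega
        | succ k => simp [List.replicate_succ]
      have hstep1 : pvStep (parts, cur, cnt) x = (pvFlush cur cnt parts, x, 1) := by
        rcases hlo x (List.mem_cons_self ..) with h0 | hlt
        · simp [pvStep, h0]
        · have : ¬ x = cur := by omega
          simp [pvStep, this]
      rw [List.flatMap_cons, List.foldl_append, hrep, List.foldl_cons, hstep1,
          pvStep_replicate (m x - 1) _ x 1 (by omega)]
      have hcnt : 1 + (m x - 1) = m x := by omega
      rw [hcnt, ih (pvFlush cur cnt parts) x (m x)
            ((List.pairwise_cons.mp hpw).2)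
            (fun y hy => hm y (List.mem_cons_of_mem _ hy))
            (fun y hy => Or.inr (List.rel_of_pairwise_cons hpw hy))]
      rw [pvFlush_pos x (m x) _ hmx]
      simp

-- count of v in the expanded runs of a nodup block list
theorem count_flatMap_replicate (m : Int → Nat) :
    ∀ (u : List Int), u.Nodup → ∀ (v : Int),
    (u.flatMap (fun x => List.replicate (m x) x)).count v = if v ∈ u then m v else 0 := by
  intro u
  induction u with
  | nil => intro _ v; simp
  | cons x u' ih =>
      intro hnd v
      rw [List.flatMap_cons, List.count_append, List.count_replicate,
          ih (List.Nodup.of_cons hnd) v]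
      by_cases hvx : v = x
      · subst hvx
        have : v ∉ u' := (List.nodup_cons.mp hnd).1
        simp [this]
      · simp [hvx, Ne.symm hvx, beq_iff_eq]

-- the expanded runs of a strictly increasing list are weakly increasing
theorem pairwise_le_flatMap_replicate (m : Int → Nat) :
    ∀ (u : List Int), u.Pairwise (· < ·) →
    (u.flatMap (fun x => List.replicate (m x) x)).Pairwise (fun a b => a ≤ b) := by
  intro u
  induction u with
  | nil => intro _; simp
  | cons x u' ih =>
      intro hpw
      rw [List.flatMap_cons]
      apply List.pairwise_append.mpr
      refine ⟨List.pairwise_replicate.mpr (by simp), ih (List.pairwise_cons.mp hpw).2, ?_⟩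
      intro a ha b hb
      have hax : a = x := List.eq_of_mem_replicate ha
      obtain ⟨y, hy, hby⟩ := List.mem_flatMap.mp hb
      have hby' : b = y := List.eq_of_mem_replicate hby
      subst hax hby'
      exact le_of_lt (List.rel_of_pairwise_cons hpw hy)

-- the expanded runs of the sorted unique factors ARE the sorted factors
theorem sorted_eq_flatMap (factors : List Int) :
    PySem.List.sorted factors (fun x => x) false
      = (PySem.List.sorted (PySem.Set.ofList factors) (fun x => x) false).flatMap
          (fun x => List.replicate (List.count x factors) x) := by
  have hlt : (PySem.List.sorted (PySem.Set.ofList factors) (fun x => x) false).Pairwise (· < ·) :=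
    PySem.List.sorted_ofList_pairwise_lt factors
  have hnd := hlt.nodup
  have hmemu : ∀ v, v ∈ PySem.List.sorted (PySem.Set.ofList factors) (fun x => x) false ↔ v ∈ factors := by
    intro v
    rw [PySem.List.mem_sorted, PySem.Set.mem_ofList]
  apply PySem.List.sorted_id_eq_of_perm_of_pairwise
  · -- permutation, by counts
    rw [List.perm_iff_count]
    intro v
    rw [count_flatMap_replicate _ _ hnd v]
    by_cases hv : v ∈ factors
    · simp [(hmemu v).mpr hv]
    · have : v ∉ PySem.List.sorted (PySem.Set.ofList factors) (fun x => x) false :=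
        fun h => hv ((hmemu v).mp h)
      simp [this, List.count_eq_zero_of_not_mem hv]
  · exact pairwise_le_flatMap_replicate _ _ hlt

-- A's fold is a map of the per-factor format over the unique factors
theorem a_fold_eq_map (factors : List Int) (u : List Int) :
    u.foldl (fun result factor =>
      if 1 < PySem.List.count factors factor then
        result ++ [PySem.Int.toStr factor ++ "^" ++ PySem.Int.toStr ((PySem.List.count factors factor : Nat) : Int)]
      else
        result ++ [PySem.Int.toStr factor]) []
    = u.map (fun factor =>
        if 1 < PySem.List.count factors factor then
          PySem.Int.toStr factor ++ "^" ++ PySem.Int.toStr ((PySem.List.count factors factor : Nat) : Int)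
        else PySem.Int.toStr factor) := by
  have hfun : (fun (result : List String) factor =>
      if 1 < PySem.List.count factors factor then
        result ++ [PySem.Int.toStr factor ++ "^" ++ PySem.Int.toStr ((PySem.List.count factors factor : Nat) : Int)]
      else
        result ++ [PySem.Int.toStr factor])
      = fun (result : List String) factor => result ++
        [if 1 < PySem.List.count factors factor then
          PySem.Int.toStr factor ++ "^" ++ PySem.Int.toStr ((PySem.List.count factors factor : Nat) : Int)
        else PySem.Int.toStr factor] := by
    funext r f
    simp only [PySem.List.count_eq]
    by_cases hc : 1 < List.count f factors <;> simp [hc]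
  rw [hfun, PySem.List.foldl_append_singleton_eq_map, List.nil_append]

-- ===== VERDICT (by name: the statement is the Claim_ definition above) =====
theorem prime_factors_to_string_spec : Claim_equal_prime_factors_to_string := by
  intro factors _
  show prime_factors_to_string factors = prime_factors_to_string_alt factors
  show PySem.Str.join " x "
      ((PySem.List.sorted (PySem.Set.ofList factors) (fun x => x) false).foldl
        (fun result factor =>
          if 1 < PySem.List.count factors factor then
            result ++ [PySem.Int.toStr factor ++ "^" ++ PySem.Int.toStr ((PySem.List.count factors factor : Nat) : Int)]
          else
            result ++ [PySem.Int.toStr factor]) [])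
    = PySem.Str.join " x "
        (pvFlush ((PySem.List.sorted factors (fun x => x) false).foldl pvStep ([], 0, 0)).2.1
          ((PySem.List.sorted factors (fun x => x) false).foldl pvStep ([], 0, 0)).2.2
          ((PySem.List.sorted factors (fun x => x) false).foldl pvStep ([], 0, 0)).1)
  have hlt : (PySem.List.sorted (PySem.Set.ofList factors) (fun x => x) false).Pairwise (· < ·) :=
    PySem.List.sorted_ofList_pairwise_lt factors
  have hpos : ∀ x ∈ PySem.List.sorted (PySem.Set.ofList factors) (fun x => x) false,
      0 < List.count x factors := by
    intro x hx
    rw [PySem.List.mem_sorted, PySem.Set.mem_ofList] at hx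
    exact List.count_pos_iff.mpr hx
  have hB := pvStep_runs (fun x => List.count x factors)
      (PySem.List.sorted (PySem.Set.ofList factors) (fun x => x) false) [] 0 0
      hlt hpos (fun x _ => Or.inl rfl)
  rw [sorted_eq_flatMap factors]
  simp only at hB
  rw [hB, a_fold_eq_map factors]
  have h0 : pvFlush 0 0 ([] : List String) = [] := by simp [pvFlush]
  rw [h0, List.nil_append]
  congr 1
  apply List.map_congr_left
  intro x hx
  have hc := hpos x hx
  unfold pvFmt
  simp only [PySem.List.count_eq]
  by_cases h1 : List.count x factors = 1
  · simp [h1]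
  · have h2 : 1 < List.count x factors := by omega
    simp [h1, h2]
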